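-- pv_equiv track=rewrite | github.com/dylanhoke/Python-Algorithm-Exercises-Solutions | Sorting/BeautifulWords.py | solution
-- ===== SOURCE A (Python) =====
-- def solution(inputString):
--
--
--     char_count = {}
--
--     for char in inputString:
--
--         if char in char_count:
--
--             char_count[char] += 1
--
--         else:
--
--             char_count[char] = 1
--
--     prev_char = None
--
--     for char in sorted(char_count.keys()):
--
--         if prev_char is not None:
--
--             if ord(char) - ord(prev_char) > 1 or char_count[char] > char_count[prev_char]:
--
--                 return False
--
--         prev_char = char
--
--     return True
-- ===== SOURCE B (Python) =====
-- def solution(inputString):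
--     # Sort the characters once; scan the sorted list run by run with two pointers,
--     # checking adjacency of consecutive distinct chars and non-increasing run lengths.
--     s = sorted(inputString)
--     n = len(s)
--     prev_char = None
--     prev_count = 0
--     i = 0
--     while i < n:
--         c = s[i]
--         j = i + 1
--         while j < n and s[j] == c:
--             j += 1
--         cnt = j - i
--         if prev_char is not None and (ord(c) - ord(prev_char) > 1 or cnt > prev_count):
--             return False
--         prev_char = c
--         prev_count = cnt
--         i = j
--     return True
-- ===== Notes on version B (the rewrite author's own statement) =====
-- stated objective: alternative
-- what changed: Replaces A's frequency-dict build plus sort of its keys by a single sort of the characters followed by a two-pointer run scan of the sorted list, deriving each character's count from its run length instead of a dict.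
import Mathlib
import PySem

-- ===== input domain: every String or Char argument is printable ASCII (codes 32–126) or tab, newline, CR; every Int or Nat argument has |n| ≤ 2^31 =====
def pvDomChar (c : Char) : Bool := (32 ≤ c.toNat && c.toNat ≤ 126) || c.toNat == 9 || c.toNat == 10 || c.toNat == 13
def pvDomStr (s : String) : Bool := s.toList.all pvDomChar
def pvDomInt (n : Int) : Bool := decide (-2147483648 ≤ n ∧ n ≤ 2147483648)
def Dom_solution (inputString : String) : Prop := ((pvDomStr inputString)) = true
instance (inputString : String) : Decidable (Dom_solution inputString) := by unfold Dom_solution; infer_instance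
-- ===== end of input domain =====

-- B sorts the characters once and scans the sorted list run by run (two pointers),
-- instead of A's frequency dict plus a sort of its keys: an alternative algorithm, not claimed faster.

-- ===== PORT A =====
-- A's second loop: for char in sorted(keys): check against prev, early return False.
-- char_count[char] is looked up with getD 0: every key scanned is in the dict, so this is exact.
def aLoop (cc : PySem.Dict Char Int) : List Char → Option Char → Bool
  | [], _ => true
  | c :: rest, prev =>
    match prev with
    | some p =>
        if ((c.toNat : Int) - (p.toNat : Int) > 1) || (cc.getD c 0 > cc.getD p 0) then false
        else aLoop cc rest (some c)
    | none => aLoop cc rest (some c)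

def solution (inputString : String) : Bool :=
  let charCount := inputString.toList.foldl
    (fun d ch => if d.contains ch then d.modify ch 0 (· + 1) else d.insert ch (1 : Int))
    PySem.Dict.empty
  aLoop charCount (PySem.List.sorted charCount.keys (fun k => k)) none

-- ===== PORT B =====
-- B's outer while loop; the inner `while j < n and s[j] == c: j += 1` is the
-- takeWhile/dropWhile split of the rest of the sorted list, cnt = j - i = 1 + run length.
def bLoop : List Char → Option (Char × Int) → Bool
  | [], _ => true
  | c :: rest, prev =>
      let cnt : Int := 1 + (rest.takeWhile (fun x => x == c)).length
      match prev with
      | some (p, pc) =>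
          if ((c.toNat : Int) - (p.toNat : Int) > 1) || (cnt > pc) then false
          else bLoop (rest.dropWhile (fun x => x == c)) (some (c, cnt))
      | none => bLoop (rest.dropWhile (fun x => x == c)) (some (c, cnt))
termination_by l _ => l.length
decreasing_by
  all_goals simpa using Nat.lt_succ_of_le (List.length_dropWhile_le _ rest)

def solution_alt (inputString : String) : Bool :=
  bLoop (PySem.List.sorted inputString.toList (fun c => c)) none

-- ===== PRECONDITION & SPEC =====
def Spec_solution (inputString : String) (out : Bool) : Prop := out = solution_alt inputString
instance (inputString : String) (out : Bool) : Decidable (Spec_solution inputString out) := by unfold Spec_solution; infer_instance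

-- ===== CLAIM (what is proved, stated in full; the proofs are below) =====
def Claim_equal_solution : Prop := ∀ (inputString : String), Dom_solution inputString → Spec_solution inputString (solution inputString)

-- ===== LEMMAS AND PROOFS =====

-- Common reference: the adjacency/count check over a list of (char, count) pairs.
def pvCheck : List (Char × Int) → Option (Char × Int) → Bool
  | [], _ => true
  | (c, n) :: rest, prev =>
      (match prev with
       | some (p, pn) => !(((c.toNat : Int) - (p.toNat : Int) > 1) || (n > pn))
       | none => true) && pvCheck rest (some (c, n))

-- The run pairs B's scan produces from a list.
def pvPairs : List Char → List (Char × Int)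
  | [] => []
  | c :: rest =>
      (c, 1 + (rest.takeWhile (fun x => x == c)).length) ::
        pvPairs (rest.dropWhile (fun x => x == c))
termination_by l => l.length
decreasing_by
  simpa using Nat.lt_succ_of_le (List.length_dropWhile_le _ rest)

theorem aLoop_eq_check (cc : PySem.Dict Char Int) (K : List Char) (prev : Option Char) :
    aLoop cc K prev = pvCheck (K.map (fun k => (k, cc.getD k 0))) (prev.map (fun p => (p, cc.getD p 0))) := by
  induction K generalizing prev with
  | nil => cases prev <;> rfl
  | cons c rest ih =>
      cases prev with
      | none => simpa [aLoop, pvCheck] using ih (some c)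
      | some p =>
          by_cases h : (((c.toNat : Int) - (p.toNat : Int) > 1) || (cc.getD c 0 > cc.getD p 0)) = true
          · simp [aLoop, pvCheck, h]
          · simp only [aLoop, pvCheck, h, Option.map_some, List.map_cons]
            simp only [Bool.not_eq_true] at h
            simp [ih (some c)]

theorem bLoop_eq_check (L : List Char) (prev : Option (Char × Int)) :
    bLoop L prev = pvCheck (pvPairs L) prev := by
  induction hn : L.length using Nat.strong_induction_on generalizing L prev with
  | _ n ih =>
  cases L with
  | nil => cases prev <;> simp [bLoop, pvPairs, pvCheck]
  | cons c rest =>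
      have hlt : (rest.dropWhile (fun x => x == c)).length < n := by
        subst hn
        simpa using Nat.lt_succ_of_le (List.length_dropWhile_le _ rest)
      cases prev with
      | none =>
          rw [bLoop, pvPairs, pvCheck]
          simpa using ih _ hlt _ _ rfl
      | some pr =>
          obtain ⟨p, pc⟩ := pr
          rw [bLoop, pvPairs, pvCheck]
          by_cases h : (((c.toNat : Int) - (p.toNat : Int) > 1) ||
              ((1 + ((rest.takeWhile (fun x => x == c)).length : Int)) > pc)) = true
          · simp [h]
          · simp only [Bool.not_eq_true] at h
            simp [h, ih _ hlt _ _ rfl]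

-- The counting fold of A is Counter.
theorem foldA_eq_counter (s : List Char) :
    s.foldl (fun d ch => if d.contains ch then d.modify ch 0 (· + 1) else d.insert ch (1 : Int))
      PySem.Dict.empty = PySem.Dict.counter s := by
  rw [PySem.Dict.counter_eq_foldl]
  have hstep : (fun (d : PySem.Dict Char Int) ch =>
      if d.contains ch then d.modify ch 0 (· + 1) else d.insert ch (1 : Int))
      = fun d x => d.modify x 0 (· + 1) := by
    funext d c
    by_cases h : d.contains c = true
    · simp [h]
    · have hget : d.get? c = none := by
        have hfind : d.items.find? (fun p => p.1 == c) = none := by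
          rw [List.find?_eq_none]
          intro p hp hbe
          exact h (List.any_eq_true.mpr ⟨p, hp, hbe⟩)
        simp [PySem.Dict.get?, hfind]
      simp [h, PySem.Dict.modify, PySem.Dict.getD, hget]
  rw [hstep]

-- In a ≤-sorted list, everything after the leading run of the head is strictly above the head.
theorem lt_of_mem_dropWhile_aux (c : Char) :
    ∀ (rest : List Char), (∀ y ∈ rest, c ≤ y) → rest.Pairwise (· ≤ ·) →
      ∀ x ∈ rest.dropWhile (fun x => x == c), c < x := by
  intro rest
  induction rest with
  | nil => intro _ _ x hx; simp at hx
  | cons r rs ih =>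
      intro hle hp x hx
      by_cases hr : (r == c) = true
      · rw [List.dropWhile_cons, if_pos hr] at hx
        exact ih (fun y hy => hle y (List.mem_cons_of_mem r hy))
          (List.pairwise_cons.mp hp).2 x hx
      · rw [List.dropWhile_cons, if_neg hr] at hx
        have hcr : c < r := lt_of_le_of_ne (hle r List.mem_cons_self)
          (fun h => hr (by simp [h.symm]))
        rcases List.mem_cons.mp hx with rfl | hxs
        · exact hcr
        · exact lt_of_lt_of_le hcr ((List.pairwise_cons.mp hp).1 x hxs)

theorem lt_of_mem_dropWhile (c : Char) (rest : List Char)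
    (hp : (c :: rest).Pairwise (· ≤ ·)) :
    ∀ x ∈ rest.dropWhile (fun x => x == c), c < x :=
  lt_of_mem_dropWhile_aux c rest (List.pairwise_cons.mp hp).1 (List.pairwise_cons.mp hp).2

-- B's run pairs of a ≤-sorted list are exactly (sorted distinct chars, multiplicities).
theorem pvPairs_sorted (L : List Char) (hp : L.Pairwise (· ≤ ·)) :
    pvPairs L = (PySem.List.sorted (PySem.Set.ofList L) (fun k => k)).map
      (fun k => (k, (L.count k : Int))) := by
  induction hn : L.length using Nat.strong_induction_on generalizing L with
  | _ n ih =>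
  cases L with
  | nil => simp [pvPairs, PySem.Set.ofList, PySem.List.sorted]
  | cons c rest =>
      set t := rest.takeWhile (fun x => x == c) with ht
      set d := rest.dropWhile (fun x => x == c) with hdd
      have hrest : t ++ d = rest := List.takeWhile_append_dropWhile
      have htc : ∀ x ∈ t, x = c := fun x hx => by
        simpa using List.mem_takeWhile_imp hx
      have hdlt : ∀ x ∈ d, c < x := lt_of_mem_dropWhile c rest hp
      have hcd : c ∉ d := fun h => lt_irrefl c (hdlt c h)
      have hdsorted : d.Pairwise (· ≤ ·) :=
        ((List.pairwise_cons.mp hp).2).sublist (List.dropWhile_sublist _)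
      have hdlen : d.length < n := by
        subst hn; simpa [hdd] using Nat.lt_succ_of_le (List.length_dropWhile_le _ rest)
      -- multiplicities
      have htcount : t.count c = t.length := by
        rw [List.count_eq_length]; intro x hx; simpa using (htc x hx).symm
      have hdcount : d.count c = 0 := List.count_eq_zero.mpr hcd
      have hrc : rest.count c = t.length := by
        rw [← hrest]; simp [List.count_append, htcount, hdcount]
      have hcount_k : ∀ k ∈ d, (c :: rest).count k = d.count k := by
        intro k hk
        have hkc : k ≠ c := fun h => by subst h; exact hcd hk
        have htk : t.count k = 0 := List.count_eq_zero.mpr (fun h => hkc (htc k h))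
        rw [← hrest]
        simp [List.count_append, htk, (Ne.symm hkc : ¬ c = k)]
      -- sorted distinct chars
      have hsortd := PySem.List.sorted_ofList_pairwise_lt (xs := d)
      have hmem_sd : ∀ x, x ∈ PySem.List.sorted (PySem.Set.ofList d) (fun k => k) ↔ x ∈ d := by
        intro x
        rw [PySem.List.mem_sorted, PySem.Set.mem_ofList]
      have hkey : PySem.List.sorted (PySem.Set.ofList (c :: rest)) (fun k => k)
          = c :: PySem.List.sorted (PySem.Set.ofList d) (fun k => k) := by
        apply PySem.List.sorted_eq_of_perm_of_pairwise_lt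
        · apply (List.perm_ext_iff_of_nodup ?_ (PySem.Set.nodup_ofList _)).mpr
          · intro x
            rw [List.mem_cons, hmem_sd, PySem.Set.mem_ofList, List.mem_cons, ← hrest,
                List.mem_append]
            constructor
            · rintro (rfl | hx)
              · exact Or.inl rfl
              · exact Or.inr (Or.inr hx)
            · rintro (rfl | hx | hx)
              · exact Or.inl rfl
              · exact Or.inl (htc x hx)
              · exact Or.inr hx
          · exact List.nodup_cons.mpr ⟨fun h => hcd ((hmem_sd c).mp h),
              ((PySem.List.sorted_perm _ _ _).nodup_iff).mpr (PySem.Set.nodup_ofList _)⟩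
        · exact List.pairwise_cons.mpr ⟨fun x hx => hdlt x ((hmem_sd x).mp hx), hsortd⟩
      -- assemble
      rw [pvPairs, hkey, List.map_cons, ← ht, ← hdd]
      congr 1
      · simp only [List.count_cons, hrc, beq_self_eq_true, if_pos]
        push_cast
        ring_nf
      · rw [ih _ hdlen d hdsorted rfl]
        apply List.map_congr_left
        intro k hk
        rw [hcount_k k ((hmem_sd k).mp hk)]

-- ===== VERDICT (by name: the statement is the Claim_ definition above) =====
theorem solution_spec : Claim_equal_solution := by
  unfold Claim_equal_solution Spec_solution
  intro inputString _
  set s := inputString.toList with hs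
  set L := PySem.List.sorted s (fun c => c) with hL
  have hLp : L.Pairwise (· ≤ ·) := by
    simpa using PySem.List.sorted_pairwise (xs := s) (key := fun c => c)
  have hperm : L.Perm s := PySem.List.sorted_perm _ _ _
  -- A's side
  rw [solution, foldA_eq_counter, aLoop_eq_check, PySem.Dict.keys_counter]
  simp only [Option.map_none]
  -- B's side
  rw [solution_alt, ← hs, ← hL, bLoop_eq_check, pvPairs_sorted L hLp]
  -- the two pair lists coincide
  have hsetperm : (PySem.Set.ofList L).Perm (PySem.Set.ofList s) := by
    apply (List.perm_ext_iff_of_nodup (PySem.Set.nodup_ofList _) (PySem.Set.nodup_ofList _)).mpr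
    intro x
    rw [PySem.Set.mem_ofList, PySem.Set.mem_ofList]
    exact hperm.mem_iff
  rw [PySem.List.sorted_eq_sorted_of_perm _ _ _ (fun a b h => h) hsetperm]
  apply congrFun
  apply congrArg
  apply List.map_congr_left
  intro k _
  rw [PySem.Dict.getD_counter, hperm.count_eq]
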